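-- pv_equiv track=rewrite | github.com/alisha017/data_structures_and_algorithms | DSA/Arrays/array_traversing.py | even_append
-- ===== SOURCE A (Python) =====
-- from typing import Optional, List
--
-- def even_append(nums: List[int]) -> List[int]:
--     original_nums_len = len(nums)
--     for i in range(original_nums_len):
--         if nums[i] % 2 == 0:
--             nums.append(0)
--
--     j = len(nums) - 1
--     for i in range(original_nums_len - 1, -1, -1):
--         if nums[i] % 2 == 0:
--             nums[j] = nums[i]
--             j -= 1
--         nums[j] = nums[i]
--         j -= 1
--     return nums
-- ===== SOURCE B (Python) =====
-- def even_append(nums):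
--     result = []
--     for x in list(nums):
--         result.append(x)
--         if x % 2 == 0:
--             result.append(x)
--     nums[:] = result
--     return nums
-- ===== Notes on version B (the rewrite author's own statement) =====
-- stated objective: simpler
-- what changed: Replaces A's two index passes (append placeholder zeros, then back-fill from the end with a write cursor) by one forward pass over a snapshot that appends each value once, twice if even, then writes the list back in place with nums[:] = result.
import Mathlib
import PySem

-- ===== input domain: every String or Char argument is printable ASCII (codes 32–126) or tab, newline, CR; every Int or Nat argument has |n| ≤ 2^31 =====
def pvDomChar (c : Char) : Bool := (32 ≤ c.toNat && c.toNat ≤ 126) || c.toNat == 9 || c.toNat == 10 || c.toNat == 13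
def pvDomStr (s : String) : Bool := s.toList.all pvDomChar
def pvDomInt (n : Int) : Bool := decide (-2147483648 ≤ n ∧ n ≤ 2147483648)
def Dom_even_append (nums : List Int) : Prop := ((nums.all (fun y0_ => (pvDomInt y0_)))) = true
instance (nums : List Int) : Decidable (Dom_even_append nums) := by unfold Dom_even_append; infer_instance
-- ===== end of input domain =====

-- B builds the duplicated list in one forward pass and writes it back, instead of A's
-- two index passes (append zeros, then back-fill with a moving cursor); simpler, same cost.
-- Both Pythons mutate `nums` in place identically (same final contents); the proof is about the return value.

-- ===== PORT A =====
-- second-loop body: 'if nums[i] % 2 == 0: nums[j] = nums[i]; j -= 1' then 'nums[j] = nums[i]; j -= 1'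
def evenAppendBody (p : List Int × Int) (i : Int) : List Int × Int :=
  let p1 :=
    if PySem.Int.mod (PySem.List.pyGetD p.1 i 0) 2 == 0 then
      (PySem.List.pySetD p.1 p.2 (PySem.List.pyGetD p.1 i 0), p.2 - 1)
    else p
  (PySem.List.pySetD p1.1 p1.2 (PySem.List.pyGetD p1.1 i 0), p1.2 - 1)

def even_append (nums : List Int) : List Int :=
  let n : Int := PySem.List.len nums
  -- for i in range(n): if nums[i] % 2 == 0: nums.append(0)   (reads at i < n are never appended cells)
  let arr := (PySem.List.pyRange 0 n 1).foldl
    (fun a i => if PySem.Int.mod (PySem.List.pyGetD a i 0) 2 == 0 then a ++ [0] else a) nums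
  -- j = len(nums) - 1; for i in range(n - 1, -1, -1): …
  let st := (PySem.List.pyRange (n - 1) (-1) (-1)).foldl evenAppendBody (arr, PySem.List.len arr - 1)
  st.1

-- ===== PORT B =====
def even_append_alt (nums : List Int) : List Int :=
  nums.foldl (fun res x =>
    let res := res ++ [x]
    if PySem.Int.mod x 2 == 0 then res ++ [x] else res) []

-- ===== PRECONDITION & SPEC =====
def Spec_even_append (nums : List Int) (out : List Int) : Prop := out = even_append_alt nums
instance (nums : List Int) (out : List Int) : Decidable (Spec_even_append nums out) := by unfold Spec_even_append; infer_instance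

-- ===== CLAIM (what is proved, stated in full; the proofs are below) =====
def Claim_equal_even_append : Prop := ∀ (nums : List Int), Dom_even_append nums → Spec_even_append nums (even_append nums)

-- ===== LEMMAS AND PROOFS =====

def dupF (v : Int) : List Int := if PySem.Int.mod v 2 == 0 then [v, v] else [v]

theorem alt_eq_flatMap (nums : List Int) : even_append_alt nums = nums.flatMap dupF := by
  unfold even_append_alt
  have : ∀ (acc : List Int), nums.foldl (fun res x =>
      let res := res ++ [x]
      if PySem.Int.mod x 2 == 0 then res ++ [x] else res) acc = acc ++ nums.flatMap dupF := by
    intro acc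
    rw [show (fun (res : List Int) (x : Int) =>
        let res := res ++ [x]
        if PySem.Int.mod x 2 == 0 then res ++ [x] else res)
      = (fun res x => res ++ dupF x) from ?_ , PySem.List.foldl_append_eq_flatMap]
    funext res x
    show (let r := res ++ [x]; if PySem.Int.mod x 2 == 0 then r ++ [x] else r) = res ++ dupF x
    unfold dupF
    by_cases h : PySem.Int.mod x 2 == 0
    · rw [if_pos h, if_pos h, List.append_assoc]; rfl
    · rw [if_neg h, if_neg h]
  simpa using this []

theorem length_flatMap_dupF (l : List Int) :
    (l.flatMap dupF).length = l.length + l.countP (fun x => PySem.Int.mod x 2 == 0) := by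
  induction l with
  | nil => rfl
  | cons x xs ih =>
    rw [List.flatMap_cons, List.length_append, ih, List.length_cons, List.countP_cons]
    unfold dupF
    by_cases h : PySem.Int.mod x 2 == 0
    · rw [if_pos h, if_pos h, List.length_cons, List.length_cons, List.length_nil]; omega
    · rw [if_neg h, if_neg h, List.length_singleton]; omega

theorem loop1_eq (nums : List Int) : ∀ (m : Nat) (z : List Int), m ≤ nums.length →
    (PySem.List.pyRange (m : Int) (nums.length : Int) 1).foldl
      (fun a i => if PySem.Int.mod (PySem.List.pyGetD a i 0) 2 == 0 then a ++ [0] else a)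
      (nums ++ z)
    = nums ++ z ++ List.replicate ((nums.drop m).countP (fun x => PySem.Int.mod x 2 == 0)) 0 := by
  intro m z hm
  induction hn : nums.length - m generalizing m z with
  | zero =>
    have : m = nums.length := by omega
    subst this
    rw [PySem.List.pyRange_one_eq_nil (by omega)]
    simp
  | succ t ih =>
    have hlt : m < nums.length := by omega
    rw [PySem.List.pyRange_one_cons (by exact_mod_cast hlt)]
    simp only [List.foldl_cons]
    have hget : PySem.List.pyGetD (nums ++ z) (m : Int) 0 = nums[m] := by
      rw [PySem.List.pyGetD_natCast]
      simp [List.getD, List.getElem?_append_left hlt, List.getElem?_eq_getElem hlt]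
    have hdrop : nums.drop m = nums[m] :: nums.drop (m + 1) := List.drop_eq_getElem_cons hlt
    have hcount : (nums.drop m).countP (fun x => PySem.Int.mod x 2 == 0)
        = (if PySem.Int.mod nums[m] 2 == 0 then 1 else 0)
          + (nums.drop (m+1)).countP (fun x => PySem.Int.mod x 2 == 0) := by
      rw [hdrop, List.countP_cons]; split <;> simp_all [Nat.add_comm]
    have hc : ((m : Int) + 1) = (((m + 1 : Nat)) : Int) := by push_cast; ring
    by_cases h : PySem.Int.mod nums[m] 2 == 0
    · rw [if_pos (by rw [hget]; exact h)]
      rw [show nums ++ z ++ [0] = nums ++ (z ++ [0]) by simp, hc,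
        ih (m + 1) (z ++ [0]) (by omega) (by omega), hcount, if_pos h, Nat.add_comm 1,
        List.replicate_succ]
      simp
    · rw [if_neg (by rw [hget]; exact h)]
      rw [hc, ih (m + 1) z (by omega) (by omega), hcount, if_neg h, Nat.zero_add]

theorem set_at {α : Type} (l r : List α) (d x : α) :
    (l ++ d :: r).set l.length x = l ++ x :: r := by
  induction l with
  | nil => rfl
  | cons a l ih => simp [ih]

theorem set_last_mid {α : Type} (p c r : List α) (x : α) (hc : c ≠ []) :
    (p ++ c ++ r).set (p.length + (c.length - 1)) x = p ++ c.dropLast ++ x :: r := by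
  obtain ⟨c₀, d, rfl⟩ := c.eq_nil_or_concat.resolve_left hc
  simp only [List.concat_eq_append]
  rw [List.dropLast_concat]
  have h1 : p ++ (c₀ ++ [d]) ++ r = (p ++ c₀) ++ d :: r := by simp
  have h2 : p.length + ((c₀ ++ [d]).length - 1) = (p ++ c₀).length := by simp
  rw [h1, h2, set_at]

theorem read_at (p tail : List Int) (v : Int) :
    PySem.List.pyGetD (p ++ v :: tail) ((p.length : Nat) : Int) 0 = v := by
  rw [PySem.List.pyGetD_natCast]
  simp [List.getD]

theorem body_step_odd (p mid rest : List Int) (v : Int)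
    (h : ¬ (PySem.Int.mod v 2 == 0) = true) :
    evenAppendBody (p ++ (v :: mid) ++ rest, ((p.length + mid.length : Nat) : Int))
        ((p.length : Nat) : Int)
    = (p ++ (v :: mid).dropLast ++ v :: rest,
       ((p.length + mid.length : Nat) : Int) - 1) := by
  have hr : PySem.List.pyGetD (p ++ (v :: mid) ++ rest) ((p.length : Nat) : Int) 0 = v := by
    rw [show p ++ (v :: mid) ++ rest = p ++ v :: (mid ++ rest) by simp]
    exact read_at p (mid ++ rest) v
  unfold evenAppendBody
  dsimp only
  rw [hr, if_neg h]
  dsimp only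
  rw [hr, PySem.List.pySetD_natCast]
  rw [show p.length + mid.length = p.length + ((v :: mid).length - 1) from by simp]
  rw [set_last_mid p (v :: mid) rest v (by simp)]

theorem body_step_even (p mid rest : List Int) (v : Int)
    (h : (PySem.Int.mod v 2 == 0) = true) (hm : mid ≠ []) :
    evenAppendBody (p ++ (v :: mid) ++ rest, ((p.length + mid.length : Nat) : Int))
        ((p.length : Nat) : Int)
    = (p ++ (v :: mid.dropLast).dropLast ++ v :: v :: rest,
       ((p.length + mid.length : Nat) : Int) - 1 - 1) := by
  have hml : 1 ≤ mid.length := List.length_pos_iff.mpr hm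
  have hr : PySem.List.pyGetD (p ++ (v :: mid) ++ rest) ((p.length : Nat) : Int) 0 = v := by
    rw [show p ++ (v :: mid) ++ rest = p ++ v :: (mid ++ rest) by simp]
    exact read_at p (mid ++ rest) v
  unfold evenAppendBody
  dsimp only
  rw [hr, if_pos h]
  dsimp only
  rw [PySem.List.pySetD_natCast]
  rw [show p.length + mid.length = p.length + ((v :: mid).length - 1) from by simp]
  rw [set_last_mid p (v :: mid) rest v (by simp)]
  rw [List.dropLast_cons_of_ne_nil hm]
  have hr2 : PySem.List.pyGetD (p ++ (v :: mid.dropLast) ++ v :: rest)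
      ((p.length : Nat) : Int) 0 = v := by
    rw [show p ++ (v :: mid.dropLast) ++ v :: rest = p ++ v :: (mid.dropLast ++ v :: rest) by simp]
    exact read_at p (mid.dropLast ++ v :: rest) v
  rw [hr2]
  rw [show ((p.length + ((v :: mid).length - 1) : Nat) : Int) - 1
      = ((p.length + (mid.length - 1) : Nat) : Int) from by
    simp only [List.length_cons]; omega]
  rw [PySem.List.pySetD_natCast]
  rw [show p.length + (mid.length - 1) = p.length + ((v :: mid.dropLast).length - 1) from by
    simp [List.length_dropLast]]
  rw [set_last_mid p (v :: mid.dropLast) (v :: rest) v (by simp)]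

-- the back-fill loop invariant: state = pre ++ mid ++ rest with cursor at the end of mid,
-- and pre ++ mid exactly as long as pre's duplicated image; the loop rewrites it to that image.
theorem loop2_eq : ∀ (pre mid rest : List Int),
    pre.length + mid.length = (pre.flatMap dupF).length →
    (PySem.List.pyRange ((pre.length : Int) - 1) (-1) (-1)).foldl evenAppendBody
      (pre ++ mid ++ rest, (pre.length : Int) + (mid.length : Int) - 1)
    = (pre.flatMap dupF ++ rest, -1) := by
  intro pre
  induction pre using List.reverseRecOn with
  | nil =>
    intro mid rest hmid
    have : mid = [] := by
      have : mid.length = 0 := by simpa using hmid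
      exact List.eq_nil_of_length_eq_zero this
    subst this
    rw [PySem.List.pyRange_neg_one_eq_nil (by simp)]
    simp
  | append_singleton pre' v ih =>
    intro mid rest hmid
    have hWlen := length_flatMap_dupF pre'
    have hL : (dupF v).length = if PySem.Int.mod v 2 == 0 then 2 else 1 := by
      unfold dupF; split <;> rfl
    simp only [List.length_append, List.flatMap_append, List.flatMap_singleton,
      List.length_singleton, hL] at hmid
    rw [show ((pre' ++ [v]).length : Int) - 1 = ((pre'.length : Nat) : Int) by
      simp]
    rw [PySem.List.pyRange_neg_one_cons (by omega)]
    simp only [List.foldl_cons]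
    rw [show (pre' ++ [v]) ++ mid ++ rest = pre' ++ (v :: mid) ++ rest by simp]
    rw [show (((pre' ++ [v]).length : Int) + (mid.length : Int) - 1)
        = ((pre'.length + mid.length : Nat) : Int) by
      push_cast [List.length_append, List.length_singleton]; ring]
    by_cases h : PySem.Int.mod v 2 == 0
    · -- even: two writes this iteration
      rw [if_pos h] at hmid
      have hM : 1 ≤ mid.length := by omega
      have hm : mid ≠ [] := by intro he; subst he; simp at hM
      rw [body_step_even pre' mid rest v h hm]
      have hlen' : ((v :: mid.dropLast).dropLast).length = mid.length - 1 := by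
        simp [List.length_dropLast]
      rw [show ((pre'.length + mid.length : Nat) : Int) - 1 - 1
          = (pre'.length : Int) + (((v :: mid.dropLast).dropLast).length : Int) - 1 by
        rw [hlen']; omega]
      rw [ih ((v :: mid.dropLast).dropLast) (v :: v :: rest) (by rw [hlen']; omega)]
      simp only [List.flatMap_append, List.flatMap_singleton]
      rw [show dupF v = [v, v] from by unfold dupF; rw [if_pos h]]
      simp
    · -- odd: one write this iteration
      rw [if_neg h] at hmid
      rw [body_step_odd pre' mid rest v h]
      have hlen' : ((v :: mid).dropLast).length = mid.length := by
        simp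
      rw [show ((pre'.length + mid.length : Nat) : Int) - 1
          = (pre'.length : Int) + (((v :: mid).dropLast).length : Int) - 1 by
        rw [hlen']; omega]
      rw [ih ((v :: mid).dropLast) (v :: rest) (by rw [hlen']; omega)]
      simp only [List.flatMap_append, List.flatMap_singleton]
      rw [show dupF v = [v] from by unfold dupF; rw [if_neg h]]
      simp

theorem even_append_eq_flatMap (nums : List Int) : even_append nums = nums.flatMap dupF := by
  unfold even_append
  simp only [PySem.List.len_eq]
  have h1 := loop1_eq nums 0 [] (by omega)
  simp only [List.append_nil, Nat.cast_zero, List.drop_zero] at h1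
  rw [h1]
  set k := nums.countP (fun x => PySem.Int.mod x 2 == 0) with hk
  have hmid : nums.length + (List.replicate k (0 : Int)).length = (nums.flatMap dupF).length := by
    rw [List.length_replicate, length_flatMap_dupF]
  have h2 := loop2_eq nums (List.replicate k (0 : Int)) [] hmid
  simp only [List.append_nil] at h2
  rw [show ((nums ++ List.replicate k (0 : Int)).length : Int) - 1
      = (nums.length : Int) + ((List.replicate k (0 : Int)).length : Int) - 1 by
    push_cast [List.length_append]; ring]
  rw [h2]

-- ===== VERDICT (by name: the statement is the Claim_ definition above) =====
theorem even_append_spec : Claim_equal_even_append := by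
  intro nums _
  unfold Spec_even_append
  rw [even_append_eq_flatMap, alt_eq_flatMap]
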